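-- pv_equiv track=rewrite | github.com/CamillaHop/TIO4145 | scripts/config_loader.py | _repair_latex_escapes
-- ===== SOURCE A (Python) =====
-- _VALID_HEX = frozenset("0123456789abcdefABCDEF")
--
-- def _repair_latex_escapes(raw: str) -> str:
--     r"""Walk left-to-right through JSON source and fix unpaired backslashes
--     that would otherwise break or silently corrupt json.loads.
--
--     The hard cases this has to handle:
--       \\sum   — already-correct: a literal-backslash escape followed by "sum".
--                 Must NOT be touched. Regex-based approaches break here.
--       \sum    — bare LaTeX, the \s escape is invalid JSON → hard error.
--                 Repair to \\sum.
--       \frac   — bare LaTeX. \f IS a valid JSON escape (form feed) so json.loads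
--                 won't error, but it silently corrupts content. Repair anyway
--                 whenever \b\f\n\r\t is followed by a letter — those letters
--                 always start LaTeX commands in this codebase, never genuine
--                 control chars.
--       \n      — at end-of-string or before punctuation: keep as newline escape.
--       \uXXXX  — keep as unicode escape.
--
--     The state machine consumes valid escape sequences as units (so the
--     second \\ of a properly-escaped pair is never independently inspected),
--     and repairs the rest. Safe on already-valid JSON: the only paths that
--     mutate the string are reached only when an unpaired \\X is encountered."""
--     out: list[str] = []
--     i = 0
--     n = len(raw)
--     while i < n:
--         c = raw[i]
--         if c != "\\":
--             out.append(c)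
--             i += 1
--             continue
--         # Lone trailing backslash → double it so JSON doesn't choke.
--         if i + 1 >= n:
--             out.append("\\\\")
--             i += 1
--             continue
--         nxt = raw[i + 1]
--         # Valid pair-consume escapes: \\ \" \/ — emit both, skip past them.
--         if nxt in '"\\/':
--             out.append(c)
--             out.append(nxt)
--             i += 2
--             continue
--         # \uXXXX — emit all 6, skip past them.
--         if (
--             nxt == "u"
--             and i + 5 < n
--             and all(ch in _VALID_HEX for ch in raw[i + 2 : i + 6])
--         ):
--             out.append(raw[i : i + 6])
--             i += 6
--             continue
--         # \b \f \n \r \t — control-char escapes. Keep ONLY if not followed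
--         # by a letter (which would mean it's actually LaTeX: \beta \frac
--         # \nabla \rho \text). Genuine control-char escapes are followed by
--         # end-of-string, whitespace, punctuation, etc.
--         if nxt in "bfnrt" and not (i + 2 < n and raw[i + 2].isalpha()):
--             out.append(c)
--             out.append(nxt)
--             i += 2
--             continue
--         # Anything else: this backslash starts an invalid (or LaTeX-style)
--         # escape. Repair by emitting "\\" + nxt so json.loads sees a valid
--         # \\ + literal char.
--         out.append("\\\\")
--         out.append(nxt)
--         i += 2
--     return "".join(out)
-- ===== SOURCE B (Python) =====
-- def _repair_latex_escapes(raw: str) -> str: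
--     # Split on backslashes: each boundary between parts is one backslash of
--     # the original; classify each part by its first character.
--     parts = raw.split("\\")
--     out = [parts[0]]
--     k = 1
--     m = len(parts)
--     while k < m:
--         seg = parts[k]
--         if seg == "":
--             out.append("\\\\")
--             if k + 1 < m:           # "\\" pair: consume the next backslash too
--                 out.append(parts[k + 1])
--                 k += 2
--             else:                   # lone trailing backslash
--                 k += 1
--             continue
--         c = seg[0]
--         if (
--             c in '"/'
--             or (c == "u" and len(seg) >= 5
--                 and all(ch in "0123456789abcdefABCDEF" for ch in seg[1:5]))
--             or (c in "bfnrt" and not (len(seg) >= 2 and seg[1].isalpha()))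
--         ):
--             out.append("\\" + seg)  # already a valid escape: keep as-is
--         else:
--             out.append("\\\\" + seg)  # repair: double the backslash
--         k += 1
--     return "".join(out)
-- ===== Notes on version B (the rewrite author's own statement) =====
-- stated objective: faster
-- what changed: Replaces the per-character index-walking while-loop state machine with one str.split('\') pass followed by a single classification of each backslash-delimited segment by its first character, rejoined at the end.
import Mathlib
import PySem

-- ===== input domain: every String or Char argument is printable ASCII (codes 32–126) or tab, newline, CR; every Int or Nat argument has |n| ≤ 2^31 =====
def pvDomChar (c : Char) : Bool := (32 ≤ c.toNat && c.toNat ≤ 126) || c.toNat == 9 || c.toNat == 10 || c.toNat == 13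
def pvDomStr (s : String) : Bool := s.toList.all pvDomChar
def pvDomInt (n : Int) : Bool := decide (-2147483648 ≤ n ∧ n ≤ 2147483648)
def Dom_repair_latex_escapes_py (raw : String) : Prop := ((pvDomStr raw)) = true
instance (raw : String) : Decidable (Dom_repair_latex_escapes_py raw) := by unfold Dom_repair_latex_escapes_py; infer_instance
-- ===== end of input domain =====

-- B replaces A's per-character index-walking state machine by one split on '\' plus a
-- per-segment classification (measured faster in Python by a constant factor); return
-- values proved equal on all inputs.

-- ===== PORT A =====
-- A's while-loop over index i becomes structural recursion over the remaining characters.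
-- the hex-digit set (A's _VALID_HEX; Source B inlines the same literal)
def pvHexA (ch : Char) : Bool := ("0123456789abcdefABCDEF".toList).contains ch

def pvGoA : List Char → List Char
  | [] => []
  | c :: rest =>
    if c ≠ '\\' then c :: pvGoA rest
    else
      match rest with
      | [] => '\\' :: '\\' :: pvGoA []          -- lone trailing backslash
      | nxt :: rest2 =>
        if nxt = '"' || nxt = '\\' || nxt = '/' then
          c :: nxt :: pvGoA rest2
        else if nxt = 'u' && decide (4 ≤ rest2.length) && (rest2.take 4).all pvHexA then
          '\\' :: 'u' :: (rest2.take 4 ++ pvGoA (rest2.drop 4))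
        else if (nxt = 'b' || nxt = 'f' || nxt = 'n' || nxt = 'r' || nxt = 't')
                && !(match rest2 with | d :: _ => PySem.Chars.isalpha d | [] => false) then
          '\\' :: nxt :: pvGoA rest2
        else
          '\\' :: '\\' :: nxt :: pvGoA rest2
  termination_by l => l.length
  decreasing_by all_goals (first | (simp_all; omega) | simp_all)

def repair_latex_escapes_py (raw : String) : String := String.mk (pvGoA raw.toList)

-- ===== PORT B =====
-- one segment (the text after one backslash, up to the next backslash): keep or repair
def pvSegFix (c : Char) (cs : List Char) : List Char :=
  if c = '"' || c = '/'
     || (c = 'u' && decide (4 ≤ cs.length) && (cs.take 4).all pvHexA)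
     || ((c = 'b' || c = 'f' || c = 'n' || c = 'r' || c = 't')
         && !(match cs with | d :: _ => PySem.Chars.isalpha d | [] => false)) then
    '\\' :: c :: cs
  else
    '\\' :: '\\' :: c :: cs

def pvGoB : List (List Char) → List Char
  | [] => []
  | [] :: [] => ['\\', '\\']                       -- lone trailing backslash
  | [] :: p :: ps => '\\' :: '\\' :: (p ++ pvGoB ps)  -- "\\" pair consumes next boundary
  | (c :: cs) :: ps => pvSegFix c cs ++ pvGoB ps

def repair_latex_escapes_py_alt (raw : String) : String :=
  match PySem.Chars.splitOn raw.toList ['\\'] with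
  | [] => String.mk []                             -- unreachable: split is never empty
  | p0 :: ps => String.mk (p0 ++ pvGoB ps)

-- ===== PRECONDITION & SPEC =====
def Spec_repair_latex_escapes_py (raw : String) (out : String) : Prop := out = repair_latex_escapes_py_alt raw
instance (raw : String) (out : String) : Decidable (Spec_repair_latex_escapes_py raw out) := by unfold Spec_repair_latex_escapes_py; infer_instance

-- ===== CLAIM (what is proved, stated in full; the proofs are below) =====
def Claim_equal_repair_latex_escapes_py : Prop := ∀ (raw : String), Dom_repair_latex_escapes_py raw → Spec_repair_latex_escapes_py raw (repair_latex_escapes_py raw)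

-- ===== LEMMAS AND PROOFS =====

-- clean head/tail form of split on a single backslash
def pvSplitBS : List Char → List Char × List (List Char)
  | [] => ([], [])
  | c :: t =>
    if c = '\\' then ([], (pvSplitBS t).1 :: (pvSplitBS t).2)
    else (c :: (pvSplitBS t).1, (pvSplitBS t).2)

theorem pvSplitOn_go_bs (fuel : Nat) : ∀ (l cur : List Char) (acc : List (List Char)),
    l.length < fuel →
    PySem.Chars.splitOn.go ['\\'] fuel l cur acc
      = acc.reverse ++ (cur.reverse ++ (pvSplitBS l).1) :: (pvSplitBS l).2 := by
  induction fuel with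
  | zero => intro l cur acc h; omega
  | succ n ih =>
    intro l cur acc h
    match l with
    | [] => simp [PySem.Chars.splitOn.go, pvSplitBS]
    | c :: rest =>
      by_cases hc : c = '\\'
      · subst hc
        rw [show PySem.Chars.splitOn.go ['\\'] (n+1) ('\\' :: rest) cur acc
              = PySem.Chars.splitOn.go ['\\'] n (List.drop 1 ('\\' :: rest)) [] (cur.reverse :: acc) by
              simp [PySem.Chars.splitOn.go, List.isPrefixOf]]
        rw [ih _ _ _ (by simpa using Nat.lt_of_succ_lt_succ h)]
        simp [pvSplitBS]
      · rw [show PySem.Chars.splitOn.go ['\\'] (n+1) (c :: rest) cur acc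
              = PySem.Chars.splitOn.go ['\\'] n rest (c :: cur) acc by
              simp [PySem.Chars.splitOn.go, List.isPrefixOf,
                    show ¬('\\' = c) from fun hh => hc hh.symm]]
        rw [ih _ _ _ (by simpa using Nat.lt_of_succ_lt_succ h)]
        simp [pvSplitBS, hc]

theorem pvSplitOn_bs (l : List Char) :
    PySem.Chars.splitOn l ['\\'] = (pvSplitBS l).1 :: (pvSplitBS l).2 := by
  unfold PySem.Chars.splitOn
  rw [pvSplitOn_go_bs (l.length + 1) l [] [] (by omega)]
  simp

-- the head segment is the longest backslash-free prefix
theorem pvSplitBS_fst (l : List Char) :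
    (pvSplitBS l).1 = l.takeWhile (fun c => !(c == '\\')) := by
  induction l with
  | nil => simp [pvSplitBS]
  | cons c t ih =>
    by_cases hc : c = '\\'
    · simp [pvSplitBS, List.takeWhile_cons, hc, ih]
    · have hb : (!(c == '\\')) = true := by simp [hc]
      simp [pvSplitBS, List.takeWhile_cons, hc, hb, ih]

def pvHeadAlpha (t : List Char) : Bool :=
  match t with | e :: _ => PySem.Chars.isalpha e | [] => false

-- one-step unfolding of A's machine, in if-form
theorem pvGoA_cons_ne {c : Char} {t : List Char} (hc : c ≠ '\\') :
    pvGoA (c :: t) = c :: pvGoA t := by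
  rw [pvGoA.eq_def]; simp [hc]

theorem pvGoA_bs_cons (d : Char) (t : List Char) :
    pvGoA ('\\' :: d :: t)
      = if d = '"' || d = '\\' || d = '/' then '\\' :: d :: pvGoA t
        else if d = 'u' && decide (4 ≤ t.length) && (t.take 4).all pvHexA then
          '\\' :: 'u' :: (t.take 4 ++ pvGoA (t.drop 4))
        else if (d = 'b' || d = 'f' || d = 'n' || d = 'r' || d = 't') && !pvHeadAlpha t then
          '\\' :: d :: pvGoA t
        else '\\' :: '\\' :: d :: pvGoA t := by
  cases t <;> (rw [pvGoA.eq_def]; rfl)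

-- B's segment classifier, in the same if-form
theorem pvSegFix_eq (c : Char) (cs : List Char) :
    pvSegFix c cs
      = if c = '"' || c = '/'
           || (c = 'u' && decide (4 ≤ cs.length) && (cs.take 4).all pvHexA)
           || ((c = 'b' || c = 'f' || c = 'n' || c = 'r' || c = 't') && !pvHeadAlpha cs) then
          '\\' :: c :: cs
        else '\\' :: '\\' :: c :: cs := by
  cases cs <;> rfl

-- hex characters are not backslashes
theorem pvHexA_ne_bs {c : Char} (h : pvHexA c = true) : c ≠ '\\' := by
  intro he; subst he; exact absurd h (by decide)

-- A copies a backslash-free block verbatim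
theorem pvGoA_nb_prefix (u : List Char) : ∀ v, (∀ c ∈ u, c ≠ '\\') →
    pvGoA (u ++ v) = u ++ pvGoA v := by
  induction u with
  | nil => intro v _; simp
  | cons c t ih =>
    intro v h
    rw [List.cons_append, pvGoA_cons_ne (h c (by simp)), ih v (fun d hd => h d (by simp [hd]))]
    simp

-- the \uXXXX test on the raw tail equals the test on its backslash-free prefix
theorem pvUcond_takeWhile (k : Nat) : ∀ t : List Char,
    (decide (k ≤ t.length) && (t.take k).all pvHexA)
      = (decide (k ≤ (t.takeWhile (fun c => !(c == '\\'))).length)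
         && ((t.takeWhile (fun c => !(c == '\\'))).take k).all pvHexA) := by
  induction k with
  | zero => intro t; simp
  | succ k ih =>
    intro t
    match t with
    | [] => simp [List.takeWhile]
    | c :: t' =>
      by_cases hc : c = '\\'
      · subst hc
        have : pvHexA '\\' = false := by decide
        simp [List.takeWhile_cons, this]
      · have hp : (!(c == '\\')) = true := by simp [hc]
        simp only [List.takeWhile_cons, hp, if_true, List.length_cons, List.take_succ_cons,
                   List.all_cons, Nat.add_le_add_iff_right, Nat.succ_le_succ_iff]
        cases hh : pvHexA c <;> simp [hh, ih t']

-- the head-is-a-letter test also agrees between raw tail and its backslash-free prefix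
theorem pvHeadAlpha_takeWhile (t : List Char) :
    pvHeadAlpha t = pvHeadAlpha (t.takeWhile (fun c => !(c == '\\'))) := by
  match t with
  | [] => rfl
  | e :: t'' =>
    by_cases he : e = '\\'
    · subst he; simp [List.takeWhile_cons]; rfl
    · have hp : (!(e == '\\')) = true := by simp [he]
      simp only [List.takeWhile_cons, hp, if_true]
      rfl

-- main lemma: A's machine equals B's split-and-classify, on the character list
theorem pvMain (n : Nat) : ∀ l : List Char, l.length ≤ n →
    pvGoA l = (pvSplitBS l).1 ++ pvGoB (pvSplitBS l).2 := by
  induction n with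
  | zero =>
    intro l h
    have hl : l = [] := List.eq_nil_of_length_eq_zero (Nat.le_zero.mp h)
    subst hl; simp [pvGoA, pvSplitBS, pvGoB]
  | succ n ih =>
    intro l h
    match l with
    | [] => simp [pvGoA, pvSplitBS, pvGoB]
    | c :: t =>
      by_cases hc : c = '\\'
      · subst hc
        match t with
        | [] => simp [pvGoA, pvSplitBS, pvGoB]
        | d :: t' =>
          have ht' : t'.length ≤ n := by simp at h; omega
          have iht := ih t' ht'
          by_cases hd : d = '\\'
          · subst hd
            rw [pvGoA_bs_cons]
            simp [pvSplitBS, pvGoB, iht]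
          · -- d ≠ '\\' : one backslash then a nonempty segment
            have hsplit : pvSplitBS ('\\' :: d :: t')
                = ([], (d :: (pvSplitBS t').1) :: (pvSplitBS t').2) := by
              simp [pvSplitBS, hd]
            rw [hsplit, pvGoA_bs_cons]
            simp only [List.nil_append, pvGoB, pvSegFix_eq]
            -- the keep-conditions agree between the two versions
            have hu_eq : (decide (4 ≤ t'.length) && (t'.take 4).all pvHexA)
                = (decide (4 ≤ (pvSplitBS t').1.length)
                   && ((pvSplitBS t').1.take 4).all pvHexA) := by
              rw [pvSplitBS_fst]; exact pvUcond_takeWhile 4 t'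
            have halpha_eq : pvHeadAlpha t' = pvHeadAlpha (pvSplitBS t').1 := by
              rw [pvSplitBS_fst]; exact pvHeadAlpha_takeWhile t'
            have hd' : decide (d = '\\') = false := decide_eq_false hd
            simp only [Bool.and_assoc]
            rw [← hu_eq, ← halpha_eq, hd']
            simp only [Bool.false_or, Bool.or_false]
            cases hb1 : (decide (d = '"') || decide (d = '/'))
            · cases ha2 : (decide (d = 'u') && (decide (4 ≤ t'.length) && (t'.take 4).all pvHexA))
              · cases ha3 : ((decide (d = 'b') || decide (d = 'f') || decide (d = 'n')
                              || decide (d = 'r') || decide (d = 't')) && !pvHeadAlpha t')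
                · simp [hb1, ha2, ha3, iht]
                · simp [hb1, ha2, ha3, iht]
              · -- the \uXXXX keep-branch
                obtain ⟨hdu', hlen, hall⟩ :
                    d = 'u' ∧ 4 ≤ t'.length ∧ ∀ x ∈ t'.take 4, pvHexA x = true := by
                  simpa using ha2
                subst hdu'
                have hnb : ∀ x ∈ t'.take 4, x ≠ '\\' := fun x hx =>
                  pvHexA_ne_bs (hall x hx)
                have hrw : t'.take 4 ++ pvGoA (t'.drop 4) = pvGoA t' := by
                  conv_rhs => rw [← List.take_append_drop 4 t']
                  rw [pvGoA_nb_prefix _ _ hnb]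
                simp [hb1, ha2, hrw, iht]
            · simp [hb1, iht]
      · rw [pvGoA_cons_ne hc]
        have ht : t.length ≤ n := by simp at h; omega
        simp [pvSplitBS, hc, ih t ht]

-- ===== VERDICT (by name: the statement is the Claim_ definition above) =====
theorem repair_latex_escapes_py_spec : Claim_equal_repair_latex_escapes_py := by
  intro raw _
  unfold Spec_repair_latex_escapes_py repair_latex_escapes_py repair_latex_escapes_py_alt
  rw [pvSplitOn_bs, pvMain raw.toList.length raw.toList le_rfl]
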